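-- pv_equiv track=rewrite | github.com/SuyeonYun/CodingTest-Practice | Python3/프로그래머스/1/389478. 택배 상자 꺼내기/택배 상자 꺼내기.py | solution
-- ===== SOURCE A (Python) =====
-- def solution(n, w, num):
--     min_h = n // w
--     max_h = min_h + 1
--     count_min = max_h * w - n
--
--     cur_h = (num - 1) // w
--
--     if cur_h % 2 == 0:
--         cur_w = (num - 1) % w
--     else:
--         cur_w = w * (cur_h + 1) - num
--
--     min_idx = []
--     for i in range(count_min):
--         if max_h % 2 == 0:
--             min_idx.append(i)
--         else:
--             min_idx.append(w - i - 1)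
--
--     if cur_w in min_idx:
--         return min_h - cur_h
--     return max_h - cur_h
-- ===== SOURCE B (Python) =====
-- def solution(n, w, num):
--     # Locate the box and compute its column's stack height directly in O(1):
--     # q full rows plus r boxes on the top row (row index q). The top row is
--     # filled left-to-right when q is even, right-to-left when q is odd, so the
--     # column holding `num` is one box taller iff it received a top-row box.
--     q, r = divmod(n, w)
--     row, col = divmod(num - 1, w)
--     if row % 2 == 1:
--         col = w - 1 - col
--     filled = col < r if q % 2 == 0 else col >= w - r
--     return q + (1 if filled else 0) - row
-- ===== Notes on version B (the rewrite author's own statement) =====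
-- stated objective: faster
-- what changed: Instead of building A's O(w) list of short top-row columns and scanning it for membership, B locates the box with one divmod, mirrors the column index on odd rows, and decides in O(1) whether that column got one of the r = n mod w boxes of the top row (left-filled or right-filled by the parity of the number of full rows).
-- outside the precondition, e.g. on solution(10, -3, 2): A returns -2, B returns -3
import Mathlib
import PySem

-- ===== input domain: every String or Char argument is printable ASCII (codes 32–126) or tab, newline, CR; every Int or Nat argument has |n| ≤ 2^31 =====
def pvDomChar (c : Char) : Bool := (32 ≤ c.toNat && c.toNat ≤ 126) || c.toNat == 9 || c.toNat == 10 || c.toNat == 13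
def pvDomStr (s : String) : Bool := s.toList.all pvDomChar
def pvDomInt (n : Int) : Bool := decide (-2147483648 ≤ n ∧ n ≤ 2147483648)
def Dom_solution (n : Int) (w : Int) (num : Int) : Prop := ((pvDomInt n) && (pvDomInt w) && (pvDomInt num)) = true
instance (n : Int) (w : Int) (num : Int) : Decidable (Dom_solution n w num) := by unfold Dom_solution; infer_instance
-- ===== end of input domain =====

-- B locates the box with one divmod and decides in O(1) which columns got a top-row box,
-- replacing A's O(w) short-column list and linear membership scan.

-- ===== PORT A =====
def solution (n : Int) (w : Int) (num : Int) : Int :=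
  let min_h := PySem.Int.floordiv n w
  let max_h := min_h + 1
  let count_min := max_h * w - n
  let cur_h := PySem.Int.floordiv (num - 1) w
  let cur_w := if PySem.Int.mod cur_h 2 = 0 then PySem.Int.mod (num - 1) w
               else w * (cur_h + 1) - num
  -- the append loop, ported as a map over the same range (each iteration appends one element)
  let min_idx := (PySem.List.pyRange 0 count_min 1).map
    (fun i => if PySem.Int.mod max_h 2 = 0 then i else w - i - 1)
  if cur_w ∈ min_idx then min_h - cur_h else max_h - cur_h

-- ===== PORT B =====
def solution_alt (n : Int) (w : Int) (num : Int) : Int :=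
  let q := PySem.Int.floordiv n w
  let r := PySem.Int.mod n w
  let row := PySem.Int.floordiv (num - 1) w
  let col0 := PySem.Int.mod (num - 1) w
  let col := if PySem.Int.mod row 2 = 1 then w - 1 - col0 else col0
  let filled := if PySem.Int.mod q 2 = 0 then col < r else w - r ≤ col
  q + (if filled then 1 else 0) - row

-- ===== PRECONDITION & SPEC =====
-- Pre_ restricts to the task's natural domain, a positive shelf width w (it also excludes
-- w = 0, where Python A raises ZeroDivisionError; for w < 0 A's empty range() is accidental).
def Pre_solution (n : Int) (w : Int) (num : Int) : Prop := 1 ≤ w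
instance (n : Int) (w : Int) (num : Int) : Decidable (Pre_solution n w num) := by
  unfold Pre_solution; infer_instance
def pvWitness_solution : Int × Int × Int := (22, 6, 8)

def Spec_solution (n : Int) (w : Int) (num : Int) (out : Int) : Prop := out = solution_alt n w num
instance (n : Int) (w : Int) (num : Int) (out : Int) : Decidable (Spec_solution n w num out) := by
  unfold Spec_solution; infer_instance

-- ===== CLAIM (what is proved, stated in full; the proofs are below) =====
def Claim_equal_solution : Prop := ∀ (n : Int) (w : Int) (num : Int), Dom_solution n w num → Pre_solution n w num → Spec_solution n w num (solution n w num)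

-- ===== LEMMAS AND PROOFS =====

theorem mem_short_iff (w c x : Int) :
    (x ∈ (PySem.List.pyRange 0 c 1).map (fun i => w - i - 1)) ↔ (w - c ≤ x ∧ x ≤ w - 1) := by
  constructor
  · rintro h
    rcases List.mem_map.mp h with ⟨i, hi, rfl⟩
    rcases (PySem.List.mem_pyRange_one).mp hi with ⟨h0, h1⟩
    omega
  · rintro ⟨h0, h1⟩
    refine List.mem_map.mpr ⟨w - x - 1, (PySem.List.mem_pyRange_one).mpr ⟨by omega, by omega⟩, by omega⟩

-- ===== VERDICT (by name: the statement is the Claim_ definition above) =====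
theorem solution_spec : Claim_equal_solution := by
  intro n w num _ hw
  have hw0 : (0:Int) < w := hw
  unfold Spec_solution
  simp only [solution, solution_alt]
  have h1 : PySem.Int.floordiv n w * w ≤ n ∧ n < (PySem.Int.floordiv n w + 1) * w :=
    (PySem.Int.floordiv_eq_iff_of_pos hw0).mp rfl
  have h2 : PySem.Int.floordiv n w * w + PySem.Int.mod n w = n :=
    PySem.Int.floordiv_mul_add_mod n w
  have h3 : PySem.Int.floordiv (num-1) w * w ≤ num-1 ∧ num-1 < (PySem.Int.floordiv (num-1) w + 1) * w :=
    (PySem.Int.floordiv_eq_iff_of_pos hw0).mp rfl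
  have h4 : PySem.Int.floordiv (num-1) w * w + PySem.Int.mod (num-1) w = num-1 :=
    PySem.Int.floordiv_mul_add_mod (num-1) w
  have h5 : PySem.Int.mod (PySem.Int.floordiv (num-1) w) 2 = (PySem.Int.floordiv (num-1) w) % 2 :=
    PySem.Int.mod_eq_emod_of_pos (by norm_num)
  have h6 : PySem.Int.mod (PySem.Int.floordiv n w) 2 = (PySem.Int.floordiv n w) % 2 :=
    PySem.Int.mod_eq_emod_of_pos (by norm_num)
  have h7 : PySem.Int.mod (PySem.Int.floordiv n w + 1) 2 = (PySem.Int.floordiv n w + 1) % 2 :=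
    PySem.Int.mod_eq_emod_of_pos (by norm_num)
  by_cases hpar : PySem.Int.mod (PySem.Int.floordiv n w + 1) 2 = 0
  · simp only [hpar, if_true]
    rw [show ((PySem.List.pyRange 0 ((PySem.Int.floordiv n w + 1) * w - n) 1).map
        (fun i => i)) = PySem.List.pyRange 0 ((PySem.Int.floordiv n w + 1) * w - n) 1 from
        List.map_id _]
    simp only [PySem.List.mem_pyRange_one]
    rw [hpar] at h7
    generalize hq : PySem.Int.floordiv n w = q at *
    generalize ht : PySem.Int.floordiv (num-1) w = t at *
    generalize hr : PySem.Int.mod n w = r at *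
    generalize hc : PySem.Int.mod (num-1) w = c at *
    have e1 : (q+1)*w = q*w+w := by ring
    have e2 : (t+1)*w = t*w+w := by ring
    have e3 : w*(t+1) = t*w+w := by ring
    simp only [e1, e2, e3] at *
    generalize q*w = Q at *
    generalize t*w = T at *
    split_ifs <;> omega
  · simp only [hpar, if_false]
    simp only [mem_short_iff]
    rw [h7] at hpar
    generalize hq : PySem.Int.floordiv n w = q at *
    generalize ht : PySem.Int.floordiv (num-1) w = t at *
    generalize hr : PySem.Int.mod n w = r at *
    generalize hc : PySem.Int.mod (num-1) w = c at *
    have e1 : (q+1)*w = q*w+w := by ring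
    have e2 : (t+1)*w = t*w+w := by ring
    have e3 : w*(t+1) = t*w+w := by ring
    simp only [e1, e2, e3] at *
    generalize q*w = Q at *
    generalize t*w = T at *
    split_ifs <;> omega
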